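-- pv_equiv track=rewrite | github.com/MrChepe09/Competitive-Programming-Codes | A2OJ/Ladder 0-1300/tram.py | tram
-- ===== SOURCE A (Python) =====
-- def tram(n, a):
--     train = 0
--     maxi = 0
--     for i in range(n):
--         train -= a[i][0]
--         train += a[i][1]
--         maxi = max(maxi, train)
--     return maxi
-- ===== SOURCE B (Python) =====
-- def tram(n, a):
--     # Divide and conquer: solve(lo, hi) returns (segment sum, max prefix sum >= 0)
--     # of the net-boarding deltas in [lo, hi); combine via
--     # maxpref(L ++ R) = max(maxpref L, sum L + maxpref R).
--     deltas = [a[i][1] - a[i][0] for i in range(n)]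
--
--     def solve(lo, hi):
--         if hi <= lo:
--             return (0, 0)
--         if hi == lo + 1:
--             d = deltas[lo]
--             return (d, max(0, d))
--         mid = (lo + hi) // 2
--         sL, mL = solve(lo, mid)
--         sR, mR = solve(mid, hi)
--         return (sL + sR, max(mL, sL + mR))
--
--     return solve(0, len(deltas))[1]
-- ===== Notes on version B (the rewrite author's own statement) =====
-- stated objective: alternative
-- what changed: B replaces A's fused left-to-right scan with a recursive divide-and-conquer: it splits the delta list in half, computes (segment sum, max prefix sum) for each half and merges them with maxpref(L++R) = max(maxpref L, sum L + maxpref R).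
import Mathlib
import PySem

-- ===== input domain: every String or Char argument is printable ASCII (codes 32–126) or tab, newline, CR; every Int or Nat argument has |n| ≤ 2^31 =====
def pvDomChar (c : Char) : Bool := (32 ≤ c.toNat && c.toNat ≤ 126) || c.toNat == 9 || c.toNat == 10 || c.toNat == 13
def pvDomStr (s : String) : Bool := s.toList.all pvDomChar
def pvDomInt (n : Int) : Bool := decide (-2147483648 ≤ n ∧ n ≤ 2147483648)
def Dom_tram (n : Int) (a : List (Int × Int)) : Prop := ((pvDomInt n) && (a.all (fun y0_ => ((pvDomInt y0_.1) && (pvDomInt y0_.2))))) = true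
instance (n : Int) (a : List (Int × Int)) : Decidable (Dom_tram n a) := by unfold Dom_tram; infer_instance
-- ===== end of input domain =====

-- B replaces A's fused left-to-right scan by a recursive divide-and-conquer on the delta list
-- (merge rule: maxpref(L ++ R) = max(maxpref L, sum L + maxpref R)); same O(n)-ish cost (objective: alternative).

-- ===== PORT A =====
-- fused loop: train -= a[i][0]; train += a[i][1]; maxi = max(maxi, train)
def tram (n : Int) (a : List (Int × Int)) : Int :=
  ((PySem.List.pyRange 0 n 1).foldl
    (fun (st : Int × Int) i =>
      let train := st.1 - (PySem.List.pyGetD a i (0, 0)).1 + (PySem.List.pyGetD a i (0, 0)).2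
      (train, max st.2 train)) (0, 0)).2

-- ===== PORT B =====
-- solve(lo, hi): (sum, max prefix sum) of deltas[lo:hi], divide and conquer
def pvSolve (ds : List Int) (lo hi : Nat) : Int × Int :=
  if hi ≤ lo then (0, 0)
  else if hi = lo + 1 then
    let d := ds.getD lo 0
    (d, max 0 d)
  else
    let mid := (lo + hi) / 2
    let L := pvSolve ds lo mid
    let R := pvSolve ds mid hi
    (L.1 + R.1, max L.2 (L.1 + R.2))
termination_by hi - lo
decreasing_by all_goals omega

-- deltas = [a[i][1] - a[i][0] for i in range(n)]; return solve(0, len(deltas))[1]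
def tram_alt (n : Int) (a : List (Int × Int)) : Int :=
  let deltas := (PySem.List.pyRange 0 n 1).map
    (fun i => (PySem.List.pyGetD a i (0, 0)).2 - (PySem.List.pyGetD a i (0, 0)).1)
  (pvSolve deltas 0 deltas.length).2

-- ===== PRECONDITION & SPEC =====
-- Pre_ excludes exactly n > len(a), where Python A (and B) raise IndexError on a[i].
def Pre_tram (n : Int) (a : List (Int × Int)) : Prop := n ≤ (a.length : Int)
instance (n : Int) (a : List (Int × Int)) : Decidable (Pre_tram n a) := by unfold Pre_tram; infer_instance
def pvWitness_tram : Int × (List (Int × Int)) := (2, [(1, 3), (2, 1)])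
def Spec_tram (n : Int) (a : List (Int × Int)) (out : Int) : Prop := out = tram_alt n a
instance (n : Int) (a : List (Int × Int)) (out : Int) : Decidable (Spec_tram n a out) := by unfold Spec_tram; infer_instance

-- ===== CLAIM (what is proved, stated in full; the proofs are below) =====
def Claim_equal_tram : Prop := ∀ (n : Int) (a : List (Int × Int)), Dom_tram n a → Pre_tram n a → Spec_tram n a (tram n a)

-- ===== LEMMAS AND PROOFS =====

-- prefix sum of net boardings over the first k stops
def pvPref (a : List (Int × Int)) (k : Nat) : Int :=
  ((a.take k).map (fun p => p.2 - p.1)).sum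

lemma pvPref_succ (a : List (Int × Int)) (m : Nat) (h : m < a.length) :
    pvPref a (m + 1) = pvPref a m + ((a[m].2) - (a[m].1)) := by
  unfold pvPref
  rw [List.take_add_one, List.getElem?_eq_getElem h]
  simp only [Option.toList_some, List.map_append, List.sum_append, List.map_cons,
    List.map_nil, List.sum_cons, List.sum_nil]
  ring

-- the running maximum A maintains
def pvMx (a : List (Int × Int)) (m : Nat) : Int :=
  (((List.range m).map (fun k => pvPref a (k + 1)))).foldl max 0

lemma pvMx_succ (a : List (Int × Int)) (m : Nat) :
    pvMx a (m + 1) = max (pvMx a m) (pvPref a (m + 1)) := by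
  simp [pvMx, List.range_succ]

-- A's loop invariant
lemma tram_fold (a : List (Int × Int)) (m : Nat) (h : m ≤ a.length) :
    (PySem.List.pyRange 0 (m : Int) 1).foldl
      (fun (st : Int × Int) i =>
        let train := st.1 - (PySem.List.pyGetD a i (0, 0)).1 + (PySem.List.pyGetD a i (0, 0)).2
        (train, max st.2 train)) (0, 0) = (pvPref a m, pvMx a m) := by
  induction m with
  | zero => simp [PySem.List.pyRange_one_eq_nil, pvPref, pvMx]
  | succ k ih =>
    have hk : k < a.length := by omega
    have hsplit : PySem.List.pyRange 0 ((k : Int) + 1) 1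
        = PySem.List.pyRange 0 (k : Int) 1 ++ [(k : Int)] :=
      PySem.List.pyRange_one_succ_right (by positivity)
    have := ih (by omega)
    push_cast
    rw [hsplit, List.foldl_append, this]
    simp only [List.foldl_cons, List.foldl_nil, PySem.List.pyGetD_natCast]
    have hget : a.getD (k : Nat) ((0 : Int), (0 : Int)) = a[k] := by
      simp [List.getD_eq_getElem?_getD, hk]
    rw [hget]
    have hp : pvPref a k - a[k].1 + a[k].2 = pvPref a (k + 1) := by
      rw [pvPref_succ a k hk]; ring
    rw [hp, pvMx_succ]

-- max prefix sum (over all prefixes, including the empty one) of a delta list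
def pvM : List Int → Int
  | [] => 0
  | d :: t => max 0 (d + pvM t)

lemma pvM_nonneg (xs : List Int) : 0 ≤ pvM xs := by
  cases xs with
  | nil => simp [pvM]
  | cons d t => simp [pvM]

lemma pvM_append (L R : List Int) : pvM (L ++ R) = max (pvM L) (L.sum + pvM R) := by
  induction L with
  | nil =>
    have := pvM_nonneg R
    simp only [List.nil_append, pvM, List.sum_nil, Int.zero_add]
    omega
  | cons x t ih =>
    simp only [List.cons_append, pvM, ih, List.sum_cons]
    have h1 := pvM_nonneg t
    have h2 := pvM_nonneg R
    omega

-- pvSolve computes (sum, pvM) of the segment ds[lo:hi]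
lemma pvSolve_eq_aux (ds : List Int) (k : Nat) : ∀ lo hi : Nat, hi - lo ≤ k →
    pvSolve ds lo hi = (((ds.drop lo).take (hi - lo)).sum, pvM ((ds.drop lo).take (hi - lo))) := by
  induction k with
  | zero =>
    intro lo hi h
    rw [pvSolve]
    simp [if_pos (by omega : hi ≤ lo), show hi - lo = 0 by omega]
    rfl
  | succ k ih =>
    intro lo hi h
    rw [pvSolve]
    split_ifs with h1 h2
    · simp [show hi - lo = 0 by omega]
      rfl
    · subst h2
      simp only [show lo + 1 - lo = 1 by omega]
      cases hdrop : ds.drop lo with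
      | nil =>
        have hlen : ds.length ≤ lo := by
          have := List.drop_eq_nil_iff.mp hdrop; omega
        simp [List.getD_eq_getElem?_getD, List.getElem?_eq_none hlen]
        rfl
      | cons d t =>
        have hsome : ds[lo]? = some d := by
          have h0 : (ds.drop lo)[0]? = some d := by rw [hdrop]; rfl
          rw [List.getElem?_drop] at h0
          simpa using h0
        simp [List.getD_eq_getElem?_getD, hsome, pvM]
    · have ihL := ih lo ((lo + hi) / 2) (by omega)
      have ihR := ih ((lo + hi) / 2) hi (by omega)
      simp only [ihL, ihR]
      have hseg : (ds.drop lo).take (hi - lo)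
          = (ds.drop lo).take ((lo + hi) / 2 - lo) ++ (ds.drop ((lo + hi) / 2)).take (hi - (lo + hi) / 2) := by
        have hsum : hi - lo = ((lo + hi) / 2 - lo) + (hi - (lo + hi) / 2) := by omega
        rw [hsum, List.take_add, List.drop_drop,
          show lo + ((lo + hi) / 2 - lo) = (lo + hi) / 2 from by omega]
      rw [hseg, List.sum_append, pvM_append]

lemma pvSolve_eq (ds : List Int) (lo hi : Nat) :
    pvSolve ds lo hi = (((ds.drop lo).take (hi - lo)).sum, pvM ((ds.drop lo).take (hi - lo))) :=
  pvSolve_eq_aux ds (hi - lo) lo hi le_rfl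

-- the port's delta list is the mapped take, for m ≤ len(a)
lemma deltas_eq (a : List (Int × Int)) (m : Nat) (h : m ≤ a.length) :
    (PySem.List.pyRange 0 (m : Int) 1).map
      (fun i => (PySem.List.pyGetD a i (0, 0)).2 - (PySem.List.pyGetD a i (0, 0)).1)
      = (a.take m).map (fun p => p.2 - p.1) := by
  induction m with
  | zero => simp [PySem.List.pyRange_one_eq_nil]
  | succ k ih =>
    have hk : k < a.length := by omega
    have hsplit : PySem.List.pyRange 0 ((k : Int) + 1) 1
        = PySem.List.pyRange 0 (k : Int) 1 ++ [(k : Int)] :=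
      PySem.List.pyRange_one_succ_right (by positivity)
    push_cast
    rw [hsplit, List.map_append, ih (by omega)]
    simp only [List.map_cons, List.map_nil, PySem.List.pyGetD_natCast]
    have hget : a.getD (k : Nat) ((0 : Int), (0 : Int)) = a[k] := by
      simp [List.getD_eq_getElem?_getD, hk]
    rw [hget, List.take_add_one, List.getElem?_eq_getElem hk, Option.toList_some,
      List.map_append, List.map_cons, List.map_nil]

lemma pvPref_le_pvMx (a : List (Int × Int)) (m : Nat) : pvPref a m ≤ pvMx a m := by
  cases m with
  | zero => simp [pvPref, pvMx]
  | succ k => rw [pvMx_succ]; exact le_max_right _ _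

-- pvM of the first-m delta list equals A's running maximum
lemma pvM_eq_pvMx (a : List (Int × Int)) (m : Nat) (h : m ≤ a.length) :
    pvM ((a.take m).map (fun p => p.2 - p.1)) = pvMx a m := by
  induction m with
  | zero => simp [pvM, pvMx]
  | succ k ih =>
    have hk : k < a.length := by omega
    rw [List.take_add_one, List.getElem?_eq_getElem hk]
    simp only [Option.toList_some, List.map_append, List.map_cons, List.map_nil]
    rw [pvM_append, ih (by omega)]
    have hsum : ((a.take k).map (fun p => p.2 - p.1)).sum = pvPref a k := rfl
    rw [hsum, pvMx_succ, pvPref_succ a k hk]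
    have h1 := pvPref_le_pvMx a k
    simp only [pvM]
    omega

-- ===== VERDICT (by name: the statement is the Claim_ definition above) =====
theorem tram_spec : Claim_equal_tram := by
  intro n a _ hpre
  unfold Spec_tram tram tram_alt
  by_cases hn : n ≤ 0
  · rw [PySem.List.pyRange_one_eq_nil hn]
    simp [pvSolve]
  · have hm : n = ((n.toNat : Nat) : Int) := by omega
    have hle : n.toNat ≤ a.length := by
      unfold Pre_tram at hpre; omega
    rw [hm, tram_fold a n.toNat hle]
    simp only [deltas_eq a n.toNat hle, pvSolve_eq, List.drop_zero, Nat.sub_zero,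
      List.take_length]
    rw [pvM_eq_pvMx a n.toNat hle]
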